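-- pv_equiv track=rewrite | github.com/SkyeGunasekaran/MENTAT | core/generator_utils.py | _find_blocked_tokens
-- ===== SOURCE A (Python) =====
-- def _find_blocked_tokens(token_ids: list[int], max_n: int) -> set[int]:
--     blocked: set[int] = set()
--     seq_len = len(token_ids)
--     for n in range(2, max_n + 1):
--         if seq_len < n:
--             continue
--         suffix = tuple(token_ids[-(n - 1):])
--         for i in range(seq_len - n + 1):
--             if tuple(token_ids[i:i + n - 1]) == suffix:
--                 if i + n - 1 < seq_len:
--                     blocked.add(token_ids[i + n - 1])
--     return blocked
-- ===== SOURCE B (Python) =====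
-- def _find_blocked_tokens(token_ids: list[int], max_n: int) -> set[int]:
--     # A match of the length-(n-1) suffix ending at j implies token_ids[j-1] == token_ids[-1],
--     # and conversely a length-1 match suffices; so one linear scan for the last token is exact.
--     if max_n < 2 or len(token_ids) < 2:
--         return set()
--     last = token_ids[-1]
--     return {b for a, b in zip(token_ids, token_ids[1:]) if a == last}
-- ===== Notes on version B (the rewrite author's own statement) =====
-- stated objective: faster
-- what changed: A scans every position for a match of each length-(n-1) suffix for every n up to max_n; B uses the fact that a length-(n-1) suffix match implies (and for blocking purposes is implied by) a length-1 match of the last token, so one linear scan collecting the successor of every occurrence of the last token is exact.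
import Mathlib
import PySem

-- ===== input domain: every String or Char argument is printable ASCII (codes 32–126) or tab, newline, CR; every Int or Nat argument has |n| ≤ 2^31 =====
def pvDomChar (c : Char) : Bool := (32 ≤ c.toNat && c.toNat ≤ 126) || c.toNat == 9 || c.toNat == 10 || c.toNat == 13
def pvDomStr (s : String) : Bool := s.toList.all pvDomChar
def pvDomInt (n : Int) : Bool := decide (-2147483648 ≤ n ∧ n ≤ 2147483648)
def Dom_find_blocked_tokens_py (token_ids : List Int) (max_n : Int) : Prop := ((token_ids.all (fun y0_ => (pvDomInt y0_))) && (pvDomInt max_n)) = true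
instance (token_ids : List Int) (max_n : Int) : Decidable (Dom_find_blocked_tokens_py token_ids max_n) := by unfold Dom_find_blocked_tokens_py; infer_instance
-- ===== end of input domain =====

-- B replaces A's nested scans over every n-gram length by one linear scan for the last token
-- (a length-(n-1) suffix match implies a length-1 match, and a length-1 match suffices): faster.

-- ===== PORT A =====
def find_blocked_tokens_py (token_ids : List Int) (max_n : Int) : List Int :=
  let seq_len : Int := token_ids.length
  (PySem.List.pyRange 2 (max_n + 1) 1).foldl (fun blocked n =>
    if seq_len < n then blocked
    else
      let suffix := PySem.List.slice token_ids (some (-(n - 1))) none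
      (PySem.List.pyRange 0 (seq_len - n + 1) 1).foldl (fun blocked i =>
        if PySem.List.slice token_ids (some i) (some (i + n - 1)) = suffix then
          if i + n - 1 < seq_len then
            PySem.Set.add blocked (PySem.List.pyGetD token_ids (i + n - 1) 0)
          else blocked
        else blocked) blocked) []

-- ===== PORT B =====
def find_blocked_tokens_py_alt (token_ids : List Int) (max_n : Int) : List Int :=
  if max_n < 2 ∨ token_ids.length < 2 then []
  else
    let last := PySem.List.pyGetD token_ids (-1) 0
    (token_ids.zip token_ids.tail).foldl
      (fun s p => if p.1 = last then PySem.Set.add s p.2 else s) []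

-- ===== PRECONDITION & SPEC =====
def Spec_find_blocked_tokens_py (token_ids : List Int) (max_n : Int) (out : List Int) : Prop := out = find_blocked_tokens_py_alt token_ids max_n
instance (token_ids : List Int) (max_n : Int) (out : List Int) : Decidable (Spec_find_blocked_tokens_py token_ids max_n out) := by unfold Spec_find_blocked_tokens_py; infer_instance

-- ===== CLAIM (what is proved, stated in full; the proofs are below) =====
def Claim_equal_find_blocked_tokens_py : Prop := ∀ (token_ids : List Int) (max_n : Int), Dom_find_blocked_tokens_py token_ids max_n → Spec_find_blocked_tokens_py token_ids max_n (find_blocked_tokens_py token_ids max_n)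

-- ===== LEMMAS AND PROOFS =====

-- zip of a list with its tail, as an index map
theorem zip_tail_eq_map_range (L : List Int) :
    L.zip L.tail = (List.range (L.length - 1)).map (fun k => (L.getD k 0, L.getD (k + 1) 0)) := by
  apply List.ext_getElem
  · simp [List.length_zip, List.length_tail]
  · intro k h1 h2
    simp only [List.length_zip, List.length_tail] at h1
    simp [List.getElem_zip, List.getElem_tail, List.getElem_map, List.getElem_range,
      List.getD_eq_getElem?_getD, List.getElem?_eq_getElem (by omega : k < L.length),
      List.getElem?_eq_getElem (by omega : k + 1 < L.length)]

-- membership in B's conditional-add fold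
theorem mem_addfold (l : List (Int × Int)) (last x : Int) (init : List Int) :
    x ∈ l.foldl (fun s p => if p.1 = last then PySem.Set.add s p.2 else s) init ↔
      x ∈ init ∨ ∃ p ∈ l, p.1 = last ∧ p.2 = x := by
  induction l generalizing init with
  | nil => simp
  | cons a t ih =>
      simp only [List.foldl_cons]
      by_cases h : a.1 = last
      · rw [if_pos h, ih]
        simp only [PySem.Set.mem_add]
        constructor
        · rintro ((hx | hx) | ⟨p, hp, hp1, hp2⟩)
          · exact Or.inl hx
          · exact Or.inr ⟨a, by simp, h, hx.symm⟩
          · exact Or.inr ⟨p, by simp [hp], hp1, hp2⟩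
        · rintro (hx | ⟨p, hp, hp1, hp2⟩)
          · exact Or.inl (Or.inl hx)
          · rcases List.mem_cons.mp hp with rfl | hp
            · exact Or.inl (Or.inr hp2.symm)
            · exact Or.inr ⟨p, hp, hp1, hp2⟩
      · rw [if_neg h, ih]
        constructor
        · rintro (hx | ⟨p, hp, hp1, hp2⟩)
          · exact Or.inl hx
          · exact Or.inr ⟨p, by simp [hp], hp1, hp2⟩
        · rintro (hx | ⟨p, hp, hp1, hp2⟩)
          · exact Or.inl hx
          · rcases List.mem_cons.mp hp with rfl | hp
            · exact absurd hp1 h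
            · exact Or.inr ⟨p, hp, hp1, hp2⟩

-- a suffix match of length n-1 ending at position j forces L[j-1] = L[len-1]
theorem match_last (L : List Int) (n i : Int) (hn2 : 2 ≤ n) (hnl : n ≤ (L.length : Int))
    (hi0 : 0 ≤ i) (hilt : i < (L.length : Int) - n + 1)
    (hs : PySem.List.slice L (some i) (some (i + n - 1)) = PySem.List.slice L (some (-(n - 1))) none) :
    L.getD (i.toNat + n.toNat - 2) 0 = L.getD (L.length - 1) 0 := by
  set k : Nat := (n - 1).toNat with hk
  have hkn : (n - 1) = (k : Int) := by omega
  have hk1 : 1 ≤ k := by omega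
  have hkl : k ≤ L.length := by omega
  have hil : i.toNat + n.toNat ≤ L.length := by omega
  rw [PySem.List.slice_toNat L hi0 (by omega), hkn, PySem.List.slice_from_neg_natCast L k hk1] at hs
  have htn : (i + n - 1).toNat - i.toNat = k := by omega
  rw [htn] at hs
  have hlen1 : ((L.drop i.toNat).take k).length = k := by
    simp [List.length_take, List.length_drop]; omega
  have e1 : ((L.drop i.toNat).take k)[k-1]'(by omega) = L[i.toNat + (k-1)]'(by omega) := by
    rw [List.getElem_take, List.getElem_drop]
  have e2 : ((L.drop (L.length - k)))[k-1]'(by simp [List.length_drop]; omega) = L[L.length - k + (k-1)]'(by omega) := by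
    rw [List.getElem_drop]
  have := List.getElem_of_eq hs (by omega : k - 1 < ((L.drop i.toNat).take k).length)
  rw [e1] at this
  rw [e2] at this
  have h1 : i.toNat + (k - 1) = i.toNat + n.toNat - 2 := by omega
  have h2 : L.length - k + (k - 1) = L.length - 1 := by omega
  have this2 : L[i.toNat + (k-1)]? = L[L.length - k + (k-1)]? := by
    rw [List.getElem?_eq_getElem (by omega), List.getElem?_eq_getElem (by omega), this]
  rw [h1, h2] at this2
  simp only [List.getD_eq_getElem?_getD, this2]

-- the n = 2 pass of A builds exactly B's scan result
theorem pass_two (L : List Int) (h2 : 2 ≤ L.length) :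
    (PySem.List.pyRange 0 ((L.length : Int) - 2 + 1) 1).foldl (fun blocked i =>
        if PySem.List.slice L (some i) (some (i + 2 - 1)) = PySem.List.slice L (some (-(2 - 1))) none then
          if i + 2 - 1 < (L.length : Int) then
            PySem.Set.add blocked (PySem.List.pyGetD L (i + 2 - 1) 0)
          else blocked
        else blocked) [] =
      (L.zip L.tail).foldl
        (fun s p => if p.1 = PySem.List.pyGetD L (-1) 0 then PySem.Set.add s p.2 else s) [] := by
  have hm : ((L.length : Int) - 2 + 1) = ((L.length - 1 : Nat) : Int) := by omega
  rw [hm, PySem.List.pyRange_zero_nat, List.foldl_map, zip_tail_eq_map_range, List.foldl_map]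
  apply PySem.List.foldl_congr_mem
  intro acc k hkmem
  have hk : k < L.length - 1 := List.mem_range.mp hkmem
  have e1 : ((k : Int) + 2 - 1) = ((k : Int) + ((1 : Nat) : Int)) := by push_cast; ring
  have hlast : PySem.List.pyGetD L (-1) 0 = L[L.length - 1]'(by omega) := by
    rw [PySem.List.pyGetD_neg_one L 0 (by intro h; simp [h] at h2), List.getLast_eq_getElem]
  have hsuffix : PySem.List.slice L (some (-(2 - 1))) none = [L[L.length - 1]'(by omega)] := by
    norm_num
    rw [PySem.List.slice_from_neg_one, List.drop_eq_getElem_cons (by omega)]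
    have : L.length - 1 + 1 = L.length := by omega
    rw [this, List.drop_length]
  have hslice : PySem.List.slice L (some (k : Int)) (some ((k : Int) + 2 - 1)) = [L[k]'(by omega)] := by
    rw [e1, PySem.List.slice_natCast_add L k 1, List.drop_eq_getElem_cons (by omega),
      List.take_succ_cons, List.take_zero]
  rw [hslice, hsuffix, e1]
  have ecast : ((k : Int) + ((1 : Nat) : Int)) = (((k + 1 : Nat)) : Int) := by push_cast; ring
  rw [ecast, PySem.List.pyGetD_natCast, hlast]
  have hlt : (((k + 1 : Nat)) : Int) < (L.length : Int) := by push_cast; omega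
  rw [if_pos hlt]
  simp only [List.cons.injEq, and_true]
  have hgd : L.getD k 0 = L[k]'(by omega) := List.getD_eq_getElem L 0 (by omega)
  rw [hgd]

-- adding an element already present leaves a set unchanged
theorem set_add_of_mem {s : PySem.Set Int} {x : Int} (h : x ∈ s) : PySem.Set.add s x = s := by
  simp [PySem.Set.add, PySem.Set.contains, h]

-- a fold every step of which fixes s
theorem foldl_fix {α β : Type} (f : α → β → α) (s : α) (l : List β)
    (h : ∀ x ∈ l, f s x = s) : l.foldl f s = s := by
  induction l with
  | nil => rfl
  | cons a t ih =>
      simp only [List.foldl_cons, h a (by simp)]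
      exact ih (fun x hx => h x (by simp [hx]))

-- every pass with n ≥ 3 only re-adds members of B's scan result
theorem pass_fix (L : List Int) (n : Int) (hn : 3 ≤ n) (hnl : n ≤ (L.length : Int)) :
    (PySem.List.pyRange 0 ((L.length : Int) - n + 1) 1).foldl (fun blocked i =>
        if PySem.List.slice L (some i) (some (i + n - 1)) = PySem.List.slice L (some (-(n - 1))) none then
          if i + n - 1 < (L.length : Int) then
            PySem.Set.add blocked (PySem.List.pyGetD L (i + n - 1) 0)
          else blocked
        else blocked)
      ((L.zip L.tail).foldl
        (fun s p => if p.1 = PySem.List.pyGetD L (-1) 0 then PySem.Set.add s p.2 else s) []) =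
      (L.zip L.tail).foldl
        (fun s p => if p.1 = PySem.List.pyGetD L (-1) 0 then PySem.Set.add s p.2 else s) [] := by
  set S := (L.zip L.tail).foldl
      (fun s p => if p.1 = PySem.List.pyGetD L (-1) 0 then PySem.Set.add s p.2 else s) [] with hS
  apply foldl_fix
  intro i hi
  rcases PySem.List.mem_pyRange_one.mp hi with ⟨hi0, hilt⟩
  by_cases hs : PySem.List.slice L (some i) (some (i + n - 1)) = PySem.List.slice L (some (-(n - 1))) none
  · rw [if_pos hs, if_pos (by omega : i + n - 1 < (L.length : Int))]
    have hlen2 : 2 ≤ L.length := by omega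
    have hlast : PySem.List.pyGetD L (-1) 0 = L.getD (L.length - 1) 0 := by
      rw [PySem.List.pyGetD_neg_one L 0 (by intro h; simp [h] at hlen2), List.getLast_eq_getElem,
        List.getD_eq_getElem L 0 (by omega)]
    have hml := match_last L n i (by omega) hnl hi0 hilt hs
    have hj : (i + n - 1).toNat = i.toNat + n.toNat - 1 := by omega
    have hpg : PySem.List.pyGetD L (i + n - 1) 0 = L.getD (i.toNat + n.toNat - 1) 0 := by
      rw [PySem.List.pyGetD_of_nonneg L 0 (by omega : (0:Int) ≤ i + n - 1), hj]
    have hmem : L.getD (i.toNat + n.toNat - 1) 0 ∈ S := by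
      rw [hS, mem_addfold]
      refine Or.inr ⟨(L.getD (i.toNat + n.toNat - 2) 0, L.getD (i.toNat + n.toNat - 1) 0), ?_, ?_, rfl⟩
      · rw [zip_tail_eq_map_range, List.mem_map]
        refine ⟨i.toNat + n.toNat - 2, List.mem_range.mpr (by omega), ?_⟩
        have : i.toNat + n.toNat - 2 + 1 = i.toNat + n.toNat - 1 := by omega
        rw [this]
      · rw [hlast, hml]
    rw [hpg, set_add_of_mem hmem]
  · rw [if_neg hs]

theorem main_eq (L : List Int) (m : Int) :
    find_blocked_tokens_py L m = find_blocked_tokens_py_alt L m := by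
  simp only [find_blocked_tokens_py, find_blocked_tokens_py_alt]
  by_cases h1 : m < 2
  · rw [PySem.List.pyRange_one_eq_nil (by omega), List.foldl_nil, if_pos (Or.inl h1)]
  · by_cases h2 : L.length < 2
    · rw [if_pos (Or.inr h2)]
      apply foldl_fix
      intro n hn
      rcases PySem.List.mem_pyRange_one.mp hn with ⟨hn2, _⟩
      rw [if_pos (by omega : (L.length : Int) < n)]
    · rw [if_neg (by exact fun h => h.elim (by omega) (by omega))]
      rw [PySem.List.pyRange_one_cons (by omega : (2 : Int) < m + 1), List.foldl_cons]
      rw [if_neg (by omega : ¬ ((L.length : Int) < 2))]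
      rw [pass_two L (by omega)]
      apply foldl_fix
      intro n hn
      rcases PySem.List.mem_pyRange_one.mp hn with ⟨hn3, _⟩
      by_cases hln : (L.length : Int) < n
      · rw [if_pos hln]
      · rw [if_neg hln]
        exact pass_fix L n hn3 (by omega)

-- ===== VERDICT (by name: the statement is the Claim_ definition above) =====
theorem find_blocked_tokens_py_spec : Claim_equal_find_blocked_tokens_py := by
  intro token_ids max_n _
  exact main_eq token_ids max_n
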